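-- pv_equiv track=rewrite | github.com/Daeell/AlGORITM-STUDY | programmers/87390/KJS.py | solution
-- ===== SOURCE A (Python) =====
-- def solution(n, left, right):
--     arr = []
--     for i in range(left//n,right//n+1):
--         if left//n == right//n:
--             for j in range(left%n,right%n+1):
--                 arr.append(max(i+1,j+1))
--         else:
--             if i == left//n:
--                 for j in range(left%n,n):
--                     arr.append(max(i+1,j+1))
--             elif left // n < i < right//n:
--                 for j in range(n):
--                     arr.append(max(i+1,j+1))
--             elif i == right//n:
--                 for j in range(0,right%n+1):
--                     arr.append(max(i+1,j+1))
--     return arr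
-- ===== SOURCE B (Python) =====
-- def solution(n, left, right):
--     return [max(k // n + 1, k % n + 1) for k in range(left, right + 1)]
-- ===== Notes on version B (the rewrite author's own statement) =====
-- stated objective: simpler
-- what changed: Replaces the row loop with first/middle/last-row branches and three inner column loops by a single flat pass over k in range(left, right+1), recovering the cell value as max(k//n+1, k%n+1).
-- outside the precondition, e.g. on solution(-4, -8, -7): A returns [], B returns [3, 2]
import Mathlib
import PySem

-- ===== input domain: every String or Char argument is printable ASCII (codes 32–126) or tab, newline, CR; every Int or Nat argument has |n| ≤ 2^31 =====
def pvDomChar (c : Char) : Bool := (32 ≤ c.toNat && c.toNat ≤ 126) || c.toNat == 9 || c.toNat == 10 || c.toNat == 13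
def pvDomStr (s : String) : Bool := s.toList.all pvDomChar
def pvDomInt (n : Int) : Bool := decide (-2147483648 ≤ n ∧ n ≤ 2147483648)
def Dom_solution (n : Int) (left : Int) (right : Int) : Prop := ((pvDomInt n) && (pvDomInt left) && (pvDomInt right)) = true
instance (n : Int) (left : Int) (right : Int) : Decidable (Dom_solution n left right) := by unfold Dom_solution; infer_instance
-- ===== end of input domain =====

-- B replaces A's per-row branching loops by one flat pass k ↦ max(k//n+1, k%n+1): simpler, same cost.

-- ===== PORT A =====
def solution (n : Int) (left : Int) (right : Int) : List Int :=
  (PySem.List.pyRange (PySem.Int.floordiv left n) (PySem.Int.floordiv right n + 1) 1).foldl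
    (fun arr i =>
      if PySem.Int.floordiv left n = PySem.Int.floordiv right n then
        arr ++ (PySem.List.pyRange (PySem.Int.mod left n) (PySem.Int.mod right n + 1) 1).map
          (fun j => max (i + 1) (j + 1))
      else if i = PySem.Int.floordiv left n then
        arr ++ (PySem.List.pyRange (PySem.Int.mod left n) n 1).map (fun j => max (i + 1) (j + 1))
      else if PySem.Int.floordiv left n < i ∧ i < PySem.Int.floordiv right n then
        arr ++ (PySem.List.pyRange 0 n 1).map (fun j => max (i + 1) (j + 1))
      else if i = PySem.Int.floordiv right n then
        arr ++ (PySem.List.pyRange 0 (PySem.Int.mod right n + 1) 1).map (fun j => max (i + 1) (j + 1))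
      else arr)
    []

-- ===== PORT B =====
def solution_alt (n : Int) (left : Int) (right : Int) : List Int :=
  (PySem.List.pyRange left (right + 1) 1).map
    (fun k => max (PySem.Int.floordiv k n + 1) (PySem.Int.mod k n + 1))

-- ===== PRECONDITION & SPEC =====
-- Pre_ excludes n = 0 (A raises ZeroDivisionError) and n ≤ -1 (outside the natural matrix-size
-- domain; A's values there are artifacts of floor division with a negative divisor).
def Pre_solution (n : Int) (left : Int) (right : Int) : Prop := 1 ≤ n
instance (n : Int) (left : Int) (right : Int) : Decidable (Pre_solution n left right) := by
  unfold Pre_solution; infer_instance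
def pvWitness_solution : Int × Int × Int := (3, 2, 5)

def Spec_solution (n : Int) (left : Int) (right : Int) (out : List Int) : Prop := out = solution_alt n left right
instance (n : Int) (left : Int) (right : Int) (out : List Int) : Decidable (Spec_solution n left right out) := by unfold Spec_solution; infer_instance

-- ===== CLAIM (what is proved, stated in full; the proofs are below) =====
def Claim_equal_solution : Prop := ∀ (n : Int) (left : Int) (right : Int), Dom_solution n left right → Pre_solution n left right → Spec_solution n left right (solution n left right)

-- ===== LEMMAS AND PROOFS =====

-- the flat cell value of B
def pvCell (n k : Int) : Int := max (PySem.Int.floordiv k n + 1) (PySem.Int.mod k n + 1)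

-- the unified per-row segment A emits for row i (all of A's branches reduce to this on its range)
def pvRow (n l r i : Int) : List Int :=
  (PySem.List.pyRange (if i = PySem.Int.floordiv l n then PySem.Int.mod l n else 0)
                      (if i = PySem.Int.floordiv r n then PySem.Int.mod r n + 1 else n) 1).map
    (fun j => max (i + 1) (j + 1))

theorem pv_flatMap_congr_mem {α β : Type} {l : List α} {f g : α → List β}
    (h : ∀ x ∈ l, f x = g x) : l.flatMap f = l.flatMap g := by
  induction l with
  | nil => rfl
  | cons a t ih =>
    simp only [List.flatMap_cons]
    rw [h a (by simp), ih (fun x hx => h x (by simp [hx]))]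

-- one row of the flat map equals A's inner map, when the column window sits inside [0, n)
theorem pv_rowEq (n i a b : Int) (hn : 0 < n) (ha : 0 ≤ a) (hb : b ≤ n) :
    (PySem.List.pyRange (i * n + a) (i * n + b) 1).map (pvCell n)
      = (PySem.List.pyRange a b 1).map (fun j => max (i + 1) (j + 1)) := by
  rw [PySem.List.pyRange_one (i * n + a), PySem.List.pyRange_one a]
  have hlen : (i * n + b - (i * n + a)).toNat = (b - a).toNat := by omega
  rw [hlen, List.map_map, List.map_map]
  apply List.map_congr_left
  intro k hk
  simp only [List.mem_range] at hk
  have hkb : a + (k : Int) < b := by omega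
  have hj0 : 0 ≤ a + (k : Int) := by omega
  have hjn : a + (k : Int) < n := by omega
  have hfd : PySem.Int.floordiv (i * n + a + (k : Int)) n = i := by
    rw [PySem.Int.floordiv_eq_iff_of_pos hn]
    constructor <;> nlinarith
  have hmod : PySem.Int.mod (i * n + a + (k : Int)) n = a + (k : Int) := by
    have := PySem.Int.floordiv_mul_add_mod (i * n + a + (k : Int)) n
    rw [hfd] at this; omega
  simp [Function.comp, pvCell, hfd, hmod]

theorem pv_mod_bounds (x n : Int) (hn : 0 < n) :
    0 ≤ PySem.Int.mod x n ∧ PySem.Int.mod x n < n := by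
  rw [PySem.Int.mod_eq_emod_of_pos hn]
  exact ⟨Int.emod_nonneg x (by omega), Int.emod_lt_of_pos x hn⟩

theorem pv_fd_mod (x n : Int) : PySem.Int.floordiv x n * n + PySem.Int.mod x n = x :=
  PySem.Int.floordiv_mul_add_mod x n

-- A's row-concatenation equals B's flat map, by induction on the number of rows
theorem pv_rows_eq (n : Int) (hn : 0 < n) : ∀ (m : Nat) (l r : Int),
    PySem.Int.floordiv l n ≤ PySem.Int.floordiv r n →
    (PySem.Int.floordiv r n - PySem.Int.floordiv l n).toNat = m →
    (PySem.List.pyRange (PySem.Int.floordiv l n) (PySem.Int.floordiv r n + 1) 1).flatMap (pvRow n l r)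
      = (PySem.List.pyRange l (r + 1) 1).map (pvCell n) := by
  intro m
  induction m with
  | zero =>
    intro l r hle hm
    have heq : PySem.Int.floordiv l n = PySem.Int.floordiv r n := by omega
    rw [← heq, PySem.List.pyRange_one_singleton]
    simp only [List.flatMap_cons, List.flatMap_nil, List.append_nil]
    have hml := pv_mod_bounds l n hn
    have hmr := pv_mod_bounds r n hn
    have h1 : (l : Int) = PySem.Int.floordiv l n * n + PySem.Int.mod l n := (pv_fd_mod l n).symm
    have h2 : r + 1 = PySem.Int.floordiv l n * n + (PySem.Int.mod r n + 1) := by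
      rw [heq]; have := pv_fd_mod r n; omega
    unfold pvRow
    rw [if_pos rfl, if_pos heq]
    conv_rhs => rw [h1, h2]
    exact (pv_rowEq n (PySem.Int.floordiv l n) (PySem.Int.mod l n) (PySem.Int.mod r n + 1) hn
      hml.1 (by omega)).symm
  | succ m ih =>
    intro l r hle hm
    set ql := PySem.Int.floordiv l n with hql
    set qr := PySem.Int.floordiv r n with hqr
    have hlt : ql < qr := by omega
    -- previous row's last cell
    set r' : Int := qr * n - 1 with hr'
    have hfd' : PySem.Int.floordiv r' n = qr - 1 := by
      rw [PySem.Int.floordiv_eq_iff_of_pos hn]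
      constructor <;> nlinarith
    have hmod' : PySem.Int.mod r' n = n - 1 := by
      have h := pv_fd_mod r' n
      rw [hfd'] at h
      have hexp : (qr - 1) * n = qr * n - n := by ring
      omega
    have hml := pv_mod_bounds l n hn
    have hmr := pv_mod_bounds r n hn
    have hlval := pv_fd_mod l n
    have hrval := pv_fd_mod r n
    rw [PySem.List.pyRange_one_succ_right (show ql ≤ qr by omega), List.flatMap_append]
    simp only [List.flatMap_cons, List.flatMap_nil, List.append_nil]
    -- the surviving rows of (l, r) agree with the rows of (l, r')
    have hcongr : (PySem.List.pyRange ql qr 1).flatMap (pvRow n l r)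
        = (PySem.List.pyRange ql qr 1).flatMap (pvRow n l r') := by
      apply pv_flatMap_congr_mem
      intro i hi
      rw [PySem.List.mem_pyRange_one] at hi
      unfold pvRow
      rw [hfd', hmod']
      rw [if_neg (show ¬ i = qr by omega)]
      by_cases hc : i = qr - 1
      · rw [if_pos hc]
        norm_num
      · rw [if_neg hc]
    rw [hcongr]
    have hre : qr - 1 + 1 = qr := by omega
    have hqrn : qr * n = PySem.Int.floordiv r n * n := rfl
    have hqln : ql * n = PySem.Int.floordiv l n * n := rfl
    have hih := ih l r' (by rw [hfd']; omega) (by rw [hfd']; omega)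
    rw [hfd', hre] at hih
    rw [hih]
    -- last row
    have hlast : pvRow n l r qr
        = (PySem.List.pyRange (qr * n) (r + 1) 1).map (pvCell n) := by
      unfold pvRow
      rw [if_neg (by omega), if_pos rfl]
      have h1 : qr * n = qr * n + (0 : Int) := by ring
      have h2 : r + 1 = qr * n + (PySem.Int.mod r n + 1) := by omega
      conv_rhs => rw [h1, h2]
      exact (pv_rowEq n qr 0 (PySem.Int.mod r n + 1) hn le_rfl (by omega)).symm
    rw [hlast, ← List.map_append]
    have hr1 : r' + 1 = qr * n := by omega
    have hlq : l ≤ qr * n := by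
      have hstep : ql * n + n ≤ qr * n := by nlinarith [hlt]
      omega
    rw [hr1, ← PySem.List.pyRange_one_append l (qr * n) (r + 1) hlq (by omega)]

-- A's foldl, with branches resolved on its range, is the flatMap of pvRow
theorem pv_A_flatMap (n l r : Int) :
    solution n l r
      = (PySem.List.pyRange (PySem.Int.floordiv l n) (PySem.Int.floordiv r n + 1) 1).flatMap
          (pvRow n l r) := by
  unfold solution
  rw [PySem.List.foldl_congr_mem (g := fun arr i => arr ++ pvRow n l r i)]
  · rw [PySem.List.foldl_append_eq_flatMap, List.nil_append]
  · intro acc i hi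
    rw [PySem.List.mem_pyRange_one] at hi
    unfold pvRow
    by_cases heq : PySem.Int.floordiv l n = PySem.Int.floordiv r n
    · rw [if_pos heq]
      have h1 : i = PySem.Int.floordiv l n := by omega
      rw [if_pos h1, if_pos (by omega)]
    · rw [if_neg heq]
      by_cases h1 : i = PySem.Int.floordiv l n
      · rw [if_pos h1, if_pos h1, if_neg (by omega)]
      · rw [if_neg h1, if_neg h1]
        by_cases h2 : PySem.Int.floordiv l n < i ∧ i < PySem.Int.floordiv r n
        · rw [if_pos h2, if_neg (by omega)]
        · rw [if_neg h2, if_pos (show i = PySem.Int.floordiv r n by omega),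
              if_pos (show i = PySem.Int.floordiv r n by omega)]

-- ===== VERDICT (by name: the statement is the Claim_ definition above) =====
theorem solution_spec : Claim_equal_solution := by
  intro n l r _ hpre
  unfold Spec_solution solution_alt
  have hn : 0 < n := hpre
  rw [pv_A_flatMap n l r]
  by_cases hle : PySem.Int.floordiv l n ≤ PySem.Int.floordiv r n
  · exact pv_rows_eq n hn _ l r hle rfl
  · -- qr < ql forces r < l: both sides are empty
    have hml := pv_mod_bounds l n hn
    have hlval := pv_fd_mod l n
    have hrl : r < l := by
      by_contra hc
      push Not at hc
      have : PySem.Int.floordiv l n * n ≤ r := by nlinarith [pv_mod_bounds r n hn, pv_fd_mod r n]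
      have := (PySem.Int.le_floordiv_iff_mul_le hn).mpr this
      omega
    rw [PySem.List.pyRange_one_eq_nil (by omega), PySem.List.pyRange_one_eq_nil (by omega)]
    rfl
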